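-- pv_equiv track=rewrite | github.com/pypi-data/pypi-mirror-252 | packages/LogsParserAIR/LogsParserAIR-0.6-py3-none-any.whl/LogsParserAIR/main.py | count_and_print_logs
-- ===== SOURCE A (Python) =====
-- from collections import defaultdict
--
-- def count_and_print_logs(log_entries):
--     log_counts = defaultdict(int)
--     output = "Log Counts:\n"
--
--     for log_type, app_name, _, _, _ in log_entries:
--         if log_type in ['ERROR', 'DEBUG', 'INFO']:
--             log_counts[(log_type, app_name)] += 1
--
--     for log_type in ['ERROR', 'DEBUG', 'INFO']:
--         for (log, app_name), count in log_counts.items():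
--             if log == log_type:
--                 if log == 'INFO':
--                     count //= 2  # Divide INFO count by 2
--                 output += f"{log} {app_name}: {count} logs\n"
--     return output
-- ===== SOURCE B (Python) =====
-- def count_and_print_logs(log_entries):
--     buckets = {t: {} for t in ('ERROR', 'DEBUG', 'INFO')}
--     for log_type, app_name, _, _, _ in log_entries:
--         if log_type in buckets:
--             b = buckets[log_type]
--             b[app_name] = b.get(app_name, 0) + 1
--     return "Log Counts:\n" + "".join(
--         f"{t} {a}: {c // 2 if t == 'INFO' else c} logs\n"
--         for t, b in buckets.items() for a, c in b.items())
-- ===== Notes on version B (the rewrite author's own statement) =====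
-- stated objective: alternative
-- what changed: Replaces A's flat (type,app) counter plus three filtered scans of its items by a single pass that buckets entries into a nested dict log_type -> ordered app counter, after which the report iterates each bucket's items directly with no per-type filtering.
import Mathlib
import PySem

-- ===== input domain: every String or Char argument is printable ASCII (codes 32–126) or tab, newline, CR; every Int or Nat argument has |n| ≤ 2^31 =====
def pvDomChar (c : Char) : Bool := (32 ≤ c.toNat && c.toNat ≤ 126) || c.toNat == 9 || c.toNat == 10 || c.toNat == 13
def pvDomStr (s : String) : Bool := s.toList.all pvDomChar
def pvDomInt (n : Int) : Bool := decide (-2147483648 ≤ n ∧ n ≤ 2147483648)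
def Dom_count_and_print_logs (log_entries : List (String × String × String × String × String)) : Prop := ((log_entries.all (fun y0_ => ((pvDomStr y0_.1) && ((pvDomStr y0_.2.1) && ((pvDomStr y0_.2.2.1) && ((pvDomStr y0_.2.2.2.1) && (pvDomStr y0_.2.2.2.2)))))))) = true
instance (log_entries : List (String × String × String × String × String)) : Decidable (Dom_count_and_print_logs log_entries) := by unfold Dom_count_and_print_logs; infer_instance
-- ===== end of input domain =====

-- B replaces A's flat (type,app) counter and three filtered scans of its items by one bucketing
-- pass into a nested dict (log_type -> ordered app counter) iterated directly — objective: alternative.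

-- ===== PORT A =====
def count_and_print_logs (log_entries : List (String × String × String × String × String)) : String :=
  let log_counts : PySem.Dict (String × String) Int :=
    log_entries.foldl (fun d e =>
      if ["ERROR", "DEBUG", "INFO"].contains e.1 then
        d.modify (e.1, e.2.1) 0 (· + 1)
      else d) PySem.Dict.empty
  let output := "Log Counts:\n"
  ["ERROR", "DEBUG", "INFO"].foldl (fun output log_type =>
    log_counts.items.foldl (fun output p =>
      if p.1.1 == log_type then
        let count := if p.1.1 == "INFO" then PySem.Int.floordiv p.2 2 else p.2
        output ++ (p.1.1 ++ " " ++ p.1.2 ++ ": " ++ PySem.Int.toStr count ++ " logs\n")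
      else output) output) output

-- ===== PORT B =====
def count_and_print_logs_alt (log_entries : List (String × String × String × String × String)) : String :=
  let buckets0 : PySem.Dict String (PySem.Dict String Int) :=
    PySem.Dict.ofList [("ERROR", PySem.Dict.empty), ("DEBUG", PySem.Dict.empty), ("INFO", PySem.Dict.empty)]
  let buckets := log_entries.foldl (fun bs e =>
    match bs.get? e.1 with
    | some b => bs.insert e.1 (b.insert e.2.1 (b.getD e.2.1 0 + 1))
    | none => bs) buckets0
  "Log Counts:\n" ++ PySem.Str.join "" (buckets.items.flatMap (fun p =>
    p.2.items.map (fun q => p.1 ++ " " ++ q.1 ++ ": " ++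
      PySem.Int.toStr (if p.1 == "INFO" then PySem.Int.floordiv q.2 2 else q.2) ++ " logs\n")))

-- ===== PRECONDITION & SPEC =====
def Spec_count_and_print_logs (log_entries : List (String × String × String × String × String)) (out : String) : Prop := out = count_and_print_logs_alt log_entries
instance (log_entries : List (String × String × String × String × String)) (out : String) : Decidable (Spec_count_and_print_logs log_entries out) := by unfold Spec_count_and_print_logs; infer_instance

-- ===== CLAIM (what is proved, stated in full; the proofs are below) =====
def Claim_equal_count_and_print_logs : Prop := ∀ (log_entries : List (String × String × String × String × String)), Dom_count_and_print_logs log_entries → Spec_count_and_print_logs log_entries (count_and_print_logs log_entries)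

-- ===== LEMMAS AND PROOFS =====

-- concatenation of a list of strings
def sconcat (l : List String) : String := l.foldl (· ++ ·) ""

theorem sconcat_toAcc (l : List String) (s : String) :
    l.foldl (· ++ ·) s = s ++ sconcat l := by
  induction l generalizing s with
  | nil => simp [sconcat]
  | cons x l ih =>
    have h : sconcat (x :: l) = x ++ sconcat l := by
      simp only [sconcat, List.foldl_cons]
      rw [show ("" ++ x : String) = x by simp, ih x]
      simp [sconcat]
    simp only [List.foldl_cons]
    rw [ih, h, String.append_assoc]

theorem sconcat_cons (x : String) (l : List String) :
    sconcat (x :: l) = x ++ sconcat l := by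
  simp only [sconcat, List.foldl_cons]
  rw [show ("" ++ x : String) = x by simp, sconcat_toAcc]
  simp [sconcat]

theorem sconcat_append (l₁ l₂ : List String) :
    sconcat (l₁ ++ l₂) = sconcat l₁ ++ sconcat l₂ := by
  induction l₁ with
  | nil => simp [sconcat]
  | cons x l ih => rw [List.cons_append, sconcat_cons, sconcat_cons, ih, String.append_assoc]

theorem join_empty_eq_sconcat (l : List String) : PySem.Str.join "" l = sconcat l := by
  induction l with
  | nil => rfl
  | cons x l ih =>
    rw [sconcat_cons, ← ih]
    apply String.ext
    cases l with
    | nil => simp [PySem.Str.join, PySem.Chars.join, List.intercalate]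
    | cons y l =>
      simp [PySem.Str.join, PySem.Chars.join_cons_cons, String.toList_append]

-- conditional-append string loop = sconcat of the mapped filter
theorem foldl_str_append_if {α : Type} (p : α → Bool) (f : α → String) (l : List α) (s : String) :
    l.foldl (fun out x => if p x then out ++ f x else out) s
      = s ++ sconcat ((l.filter p).map f) := by
  induction l generalizing s with
  | nil => simp [sconcat]
  | cons x l ih =>
    simp only [List.foldl_cons, List.filter_cons]
    by_cases h : p x = true
    · simp only [h, if_true, ih, List.map_cons, sconcat_cons, String.append_assoc]
    · simp only [Bool.not_eq_true] at h
      simp [h, ih]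

-- a conditional loop is the loop over the filtered-and-mapped list
theorem foldl_if_eq_foldl_filter_map {α β γ : Type} (c : α → Bool) (f : α → β)
    (g : γ → β → γ) (l : List α) (acc : γ) :
    l.foldl (fun acc x => if c x then g acc (f x) else acc) acc
      = ((l.filter c).map f).foldl g acc := by
  induction l generalizing acc with
  | nil => rfl
  | cons x l ih =>
    simp only [List.foldl_cons, List.filter_cons]
    by_cases h : c x = true
    · simp [h, ih]
    · simp only [Bool.not_eq_true] at h
      simp [h, ih]

-- membership transfer: a pair with first component t is in ks iff its second component
-- is among the apps of type t
theorem mem_apps_iff (ks : List (String × String)) (t : String) (x : String × String)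
    (hx : x.1 = t) :
    x ∈ ks ↔ x.2 ∈ (ks.filter (fun k => k.1 == t)).map (fun k => k.2) := by
  constructor
  · intro h
    exact List.mem_map.mpr ⟨x, List.mem_filter.mpr ⟨h, by simp [hx]⟩, rfl⟩
  · intro h
    obtain ⟨k, hk, hk2⟩ := List.mem_map.mp h
    obtain ⟨hks, hkt⟩ := List.mem_filter.mp hk
    have : k = x := by
      have h1 : k.1 = t := by simpa using hkt
      exact Prod.ext (h1.trans hx.symm) hk2
    exact this ▸ hks

-- L1: the per-type slice of the deduped key list is the dedup of the per-type app list
theorem set_filter_map_eq (ks : List (String × String)) (t : String) :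
    ((PySem.Set.ofList ks).filter (fun k => k.1 == t)).map (fun k => k.2)
      = PySem.Set.ofList ((ks.filter (fun k => k.1 == t)).map (fun k => k.2)) := by
  induction ks using List.reverseRecOn with
  | nil => rfl
  | append_singleton ks x ih =>
    rw [PySem.Set.ofList_append_singleton, PySem.Set.add_eq_ite]
    by_cases hin : x ∈ PySem.Set.ofList ks
    · rw [if_pos hin]
      by_cases hxt : (x.1 == t) = true
      · have hx1 : x.1 = t := by simpa using hxt
        have happ' : x.2 ∈ PySem.Set.ofList ((ks.filter (fun k => k.1 == t)).map (fun k => k.2)) :=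
          (PySem.Set.mem_ofList _ _).mpr ((mem_apps_iff ks t x hx1).mp ((PySem.Set.mem_ofList _ _).mp hin))
        rw [List.filter_append, List.map_append]
        simp only [List.filter_cons, hxt, if_true, List.filter_nil, List.map_cons, List.map_nil]
        rw [PySem.Set.ofList_append_singleton, PySem.Set.add_eq_ite, if_pos happ']
        exact ih
      · have hx1 : (x.1 == t) = false := by simpa using hxt
        rw [List.filter_append, List.map_append]
        simp only [List.filter_cons, hx1, Bool.false_eq_true, if_false, List.filter_nil,
          List.map_nil, List.append_nil]
        exact ih
    · rw [if_neg hin]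
      rw [List.filter_append, List.map_append, List.filter_append, List.map_append]
      by_cases hxt : (x.1 == t) = true
      · have hx1 : x.1 = t := by simpa using hxt
        have happ : x.2 ∉ PySem.Set.ofList ((ks.filter (fun k => k.1 == t)).map (fun k => k.2)) := by
          intro h
          exact hin ((PySem.Set.mem_ofList _ _).mpr
            ((mem_apps_iff ks t x hx1).mpr ((PySem.Set.mem_ofList _ _).mp h)))
        simp only [List.filter_cons, hxt, if_true, List.filter_nil, List.map_cons, List.map_nil]
        rw [PySem.Set.ofList_append_singleton, PySem.Set.add_eq_ite, if_neg happ, ih]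
      · have hx1 : (x.1 == t) = false := by simpa using hxt
        simp only [List.filter_cons, hx1, Bool.false_eq_true, if_false, List.filter_nil,
          List.map_nil, List.append_nil]
        exact ih

-- L2: counting a (t, a) pair in ks = counting a in the type-t app list
theorem count_pair_eq (ks : List (String × String)) (t a : String) :
    List.count (t, a) ks = List.count a ((ks.filter (fun k => k.1 == t)).map (fun k => k.2)) := by
  induction ks with
  | nil => rfl
  | cons k ks ih =>
    rw [List.count_cons, List.filter_cons]
    by_cases hkt : (k.1 == t) = true
    · have hbeq : (k == (t, a)) = (k.1 == t && k.2 == a) := rfl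
      simp [hbeq, hkt, List.count_cons, ih, Nat.add_comm]
    · have hbeq : (k == (t, a)) = (k.1 == t && k.2 == a) := rfl
      simp [hbeq, hkt, ih]

-- key lemma: both programs enumerate (app, count) pairs of one type identically
theorem key_lemma (ks : List (String × String)) (t : String) :
    ((PySem.Set.ofList ks).filter (fun k => k.1 == t)).map (fun k => (k.2, List.count k ks))
      = (PySem.Set.ofList ((ks.filter (fun k => k.1 == t)).map (fun k => k.2))).map
          (fun a => (a, List.count a ((ks.filter (fun k => k.1 == t)).map (fun k => k.2)))) := by
  rw [← set_filter_map_eq, List.map_map]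
  apply List.map_congr_left
  intro k hk
  have hk1 : k.1 = t := by simpa using (List.mem_filter.mp hk).2
  have hkk : k = (t, k.2) := Prod.ext hk1 rfl
  simp only [Function.comp]
  rw [hkk, ← count_pair_eq]

-- filter-then-map through a map
theorem filter_map_map {α β γ : Type} (l : List α) (f : α → β) (p : β → Bool) (g : β → γ) :
    ((l.map f).filter p).map g = (l.filter (fun x => p (f x))).map (fun x => g (f x)) := by
  rw [List.filter_map, List.map_map]
  rfl

-- A's per-type line list (over counter items) as a map over the deduped per-type app list
theorem per_type_lines (ks : List (String × String)) (t : String) :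
    (((PySem.Set.ofList ks).map (fun k => (k, (List.count k ks : Int)))).filter
        (fun p => p.1.1 == t)).map
      (fun p => p.1.1 ++ " " ++ p.1.2 ++ ": " ++
        PySem.Int.toStr (if p.1.1 == "INFO" then PySem.Int.floordiv p.2 2 else p.2) ++ " logs\n")
      = (PySem.Set.ofList ((ks.filter (fun k => k.1 == t)).map (fun k => k.2))).map
          (fun a =>
            let c : Int := List.count a ((ks.filter (fun k => k.1 == t)).map (fun k => k.2))
            t ++ " " ++ a ++ ": " ++
              PySem.Int.toStr (if t == "INFO" then PySem.Int.floordiv c 2 else c) ++ " logs\n") := by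
  rw [filter_map_map]
  have h2 : ((PySem.Set.ofList ks).filter (fun k => k.1 == t)).map
        (fun k => k.1 ++ " " ++ k.2 ++ ": " ++
          PySem.Int.toStr (if k.1 == "INFO" then PySem.Int.floordiv (List.count k ks : Int) 2
            else (List.count k ks : Int)) ++ " logs\n")
      = (((PySem.Set.ofList ks).filter (fun k => k.1 == t)).map
          (fun k => (k.2, List.count k ks))).map
          (fun q : String × Nat => t ++ " " ++ q.1 ++ ": " ++
            PySem.Int.toStr (if t == "INFO" then PySem.Int.floordiv (q.2 : Int) 2
              else (q.2 : Int)) ++ " logs\n") := by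
    rw [List.map_map]
    apply List.map_congr_left
    intro k hk
    have hk1 : k.1 = t := by simpa using (List.mem_filter.mp hk).2
    simp [Function.comp, hk1]
  rw [h2, key_lemma, List.map_map]
  apply List.map_congr_left
  intro a _
  simp [Function.comp]

-- the three-key bucket dict as a literal
def mk3 (a b c : PySem.Dict String Int) : PySem.Dict String (PySem.Dict String Int) :=
  PySem.Dict.mk [("ERROR", a), ("DEBUG", b), ("INFO", c)]

-- the apps of one log type, read off the raw entries
def appsOf (t : String) (l : List (String × String × String × String × String)) : List String :=
  (l.filter (fun e => e.1 == t)).map (fun e => e.2.1)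

theorem appsOf_append_singleton (t : String) (l : List (String × String × String × String × String))
    (x : String × String × String × String × String) :
    appsOf t (l ++ [x]) = appsOf t l ++ (if x.1 == t then [x.2.1] else []) := by
  unfold appsOf
  rw [List.filter_append, List.map_append]
  by_cases h : (x.1 == t) = true
  · simp [h]
  · simp only [Bool.not_eq_true] at h
    simp [h]

theorem counter_append_singleton' (xs : List String) (a : String) :
    PySem.Dict.counter (xs ++ [a])
      = (PySem.Dict.counter xs).insert a ((PySem.Dict.counter xs).getD a 0 + 1) := by
  rw [← PySem.Dict.foldl_insert_getD_add_one_eq_counter, List.foldl_append,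
    PySem.Dict.foldl_insert_getD_add_one_eq_counter]
  simp [List.foldl]

-- the bucketing fold of B computes the three per-type counters
theorem bucket_fold (l : List (String × String × String × String × String)) :
    l.foldl (fun bs e =>
        match bs.get? e.1 with
        | some b => bs.insert e.1 (b.insert e.2.1 (b.getD e.2.1 0 + 1))
        | none => bs)
      ((PySem.Dict.ofList [("ERROR", PySem.Dict.empty), ("DEBUG", PySem.Dict.empty), ("INFO", PySem.Dict.empty)] : PySem.Dict String (PySem.Dict String Int)))
      = mk3 (PySem.Dict.counter (appsOf "ERROR" l)) (PySem.Dict.counter (appsOf "DEBUG" l))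
            (PySem.Dict.counter (appsOf "INFO" l)) := by
  induction l using List.reverseRecOn with
  | nil => rfl
  | append_singleton l x ih =>
    rw [List.foldl_append, ih]
    simp only [List.foldl]
    by_cases hE : x.1 = "ERROR"
    · rw [hE]
      show (mk3 _ _ _).insert "ERROR" _ = _
      rw [show ∀ a b c v, (mk3 a b c).insert "ERROR" v = mk3 v b c from fun _ _ _ _ => rfl]
      rw [appsOf_append_singleton, appsOf_append_singleton, appsOf_append_singleton, hE]
      simp [counter_append_singleton']
    · by_cases hD : x.1 = "DEBUG"
      · rw [hD]
        show (mk3 _ _ _).insert "DEBUG" _ = _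
        rw [show ∀ a b c v, (mk3 a b c).insert "DEBUG" v = mk3 a v c from fun _ _ _ _ => rfl]
        rw [appsOf_append_singleton, appsOf_append_singleton, appsOf_append_singleton, hD]
        simp [counter_append_singleton']
      · by_cases hI : x.1 = "INFO"
        · rw [hI]
          show (mk3 _ _ _).insert "INFO" _ = _
          rw [show ∀ a b c v, (mk3 a b c).insert "INFO" v = mk3 a b v from fun _ _ _ _ => rfl]
          rw [appsOf_append_singleton, appsOf_append_singleton, appsOf_append_singleton, hI]
          simp [counter_append_singleton']
        · have hnone : (mk3 (PySem.Dict.counter (appsOf "ERROR" l)) (PySem.Dict.counter (appsOf "DEBUG" l))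
              (PySem.Dict.counter (appsOf "INFO" l))).get? x.1 = none := by
            simp [mk3, Ne.symm hE, Ne.symm hD, Ne.symm hI,
              PySem.Dict.get?]
          rw [hnone]
          rw [appsOf_append_singleton, appsOf_append_singleton, appsOf_append_singleton]
          simp [hE, hD, hI]

-- the per-type app slice of A's key list equals appsOf, for each of the three types
theorem appsK_eq_appsOf (l : List (String × String × String × String × String)) (t : String)
    (ht : ["ERROR", "DEBUG", "INFO"].contains t = true) :
    (((l.filter (fun e => ["ERROR", "DEBUG", "INFO"].contains e.1)).map
        (fun e => (e.1, e.2.1))).filter (fun k => k.1 == t)).map (fun k => k.2)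
      = appsOf t l := by
  rw [List.filter_map, List.map_map]
  unfold appsOf
  rw [List.filter_filter]
  congr 1
  apply List.filter_congr
  intro e _
  by_cases h : (e.1 == t) = true
  · have he : e.1 = t := by simpa using h
    have ht' : t = "ERROR" ∨ t = "DEBUG" ∨ t = "INFO" := by simpa using ht
    rcases ht' with h' | h' | h' <;> simp [Function.comp, he, h']
  · simp only [Bool.not_eq_true] at h
    simp [Function.comp, h]

theorem count_and_print_logs_spec' (log_entries : List (String × String × String × String × String)) :
    count_and_print_logs log_entries = count_and_print_logs_alt log_entries := by
  unfold count_and_print_logs count_and_print_logs_alt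
  simp only []
  -- A's counter over the valid (type, app) keys
  have hd : log_entries.foldl
      (fun d e => if ["ERROR", "DEBUG", "INFO"].contains e.1 then
        d.modify (e.1, e.2.1) 0 (· + 1) else d) (PySem.Dict.empty : PySem.Dict (String × String) Int)
      = ((log_entries.filter
          (fun e => ["ERROR", "DEBUG", "INFO"].contains e.1)).map (fun e => (e.1, e.2.1))).foldl
          (fun d k => d.modify k 0 (· + 1)) (PySem.Dict.empty : PySem.Dict (String × String) Int) :=
    foldl_if_eq_foldl_filter_map
      (fun e : String × String × String × String × String => ["ERROR", "DEBUG", "INFO"].contains e.1)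
      (fun e => (e.1, e.2.1)) (fun (d : PySem.Dict (String × String) Int) k => d.modify k 0 (· + 1)) log_entries PySem.Dict.empty
  rw [hd, ← PySem.Dict.counter_eq_foldl, PySem.Dict.items_counter]
  -- B's bucket fold
  rw [bucket_fold]
  -- unfold both output stages
  simp only [List.foldl_cons, List.foldl_nil]
  simp only [foldl_str_append_if]
  rw [show (mk3 (PySem.Dict.counter (appsOf "ERROR" log_entries))
      (PySem.Dict.counter (appsOf "DEBUG" log_entries))
      (PySem.Dict.counter (appsOf "INFO" log_entries))).items
    = [("ERROR", PySem.Dict.counter (appsOf "ERROR" log_entries)),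
       ("DEBUG", PySem.Dict.counter (appsOf "DEBUG" log_entries)),
       ("INFO", PySem.Dict.counter (appsOf "INFO" log_entries))] from rfl]
  simp only [List.flatMap_cons, List.flatMap_nil, List.append_nil]
  rw [join_empty_eq_sconcat, sconcat_append, sconcat_append]
  rw [per_type_lines, per_type_lines, per_type_lines]
  rw [appsK_eq_appsOf _ "ERROR" rfl, appsK_eq_appsOf _ "DEBUG" rfl, appsK_eq_appsOf _ "INFO" rfl]
  rw [PySem.Dict.items_counter, PySem.Dict.items_counter, PySem.Dict.items_counter]
  simp only [List.map_map]
  simp [Function.comp_def, String.append_assoc]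

-- ===== VERDICT (by name: the statement is the Claim_ definition above) =====
theorem count_and_print_logs_spec : Claim_equal_count_and_print_logs := by
  intro log_entries _
  exact count_and_print_logs_spec' log_entries
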